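-- pv_equiv track=rewrite | github.com/wseungjin/SLRParser | lexical_analyzer.py | isScope
-- ===== SOURCE A (Python) =====
-- def isScope(stack):  #13 함수나 변수 범위
--   state = 'T0'
--   for i in stack:
--     if (i=='{' or i== '}') and state == 'T0':
--       state = 'T1'
--     else:
--       state = 'false'
--
--   if state=='T1':
--     return True
--   else:
--     return False
-- ===== SOURCE B (Python) =====
-- def isScope(stack):
--     return len(stack) == 1 and (stack[0] == '{' or stack[0] == '}')
-- ===== Notes on version B (the rewrite author's own statement) =====
-- stated objective: simpler
-- what changed: Replaced the loop with a string state machine by a closed-form boolean: True iff the stack has exactly one element and it is '{' or '}'.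
import Mathlib
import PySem

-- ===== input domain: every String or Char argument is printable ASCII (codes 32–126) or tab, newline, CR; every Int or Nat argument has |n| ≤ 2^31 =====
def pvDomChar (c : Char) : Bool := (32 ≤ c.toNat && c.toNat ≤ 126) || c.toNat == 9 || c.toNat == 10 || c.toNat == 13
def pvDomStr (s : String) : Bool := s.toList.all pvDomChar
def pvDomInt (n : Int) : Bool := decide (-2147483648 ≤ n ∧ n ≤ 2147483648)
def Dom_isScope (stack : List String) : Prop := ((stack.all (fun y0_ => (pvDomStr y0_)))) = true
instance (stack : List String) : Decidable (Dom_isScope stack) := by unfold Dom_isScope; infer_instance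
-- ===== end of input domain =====

-- B replaces A's loop/state machine by a closed-form check: stack has exactly one element and it is a brace (simpler, same result).


-- ===== PORT A =====
def isScopeStep (st : String) (i : String) : String :=
  if (i == "{" || i == "}") && st == "T0" then "T1" else "false"

def isScope (stack : List String) : Bool :=
  let state := stack.foldl isScopeStep "T0"
  if state == "T1" then true else false

-- ===== PORT B =====
def isScope_alt (stack : List String) : Bool :=
  match stack with
  | [x] => x == "{" || x == "}"
  | _ => false

-- ===== PRECONDITION & SPEC =====
def Spec_isScope (stack : List String) (out : Bool) : Prop := out = isScope_alt stack
instance (stack : List String) (out : Bool) : Decidable (Spec_isScope stack out) := by unfold Spec_isScope; infer_instance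

-- ===== CLAIM (what is proved, stated in full; the proofs are below) =====
def Claim_equal_isScope : Prop := ∀ (stack : List String), Dom_isScope stack → Spec_isScope stack (isScope stack)

-- ===== LEMMAS AND PROOFS =====
theorem foldl_step_false (l : List String) : l.foldl isScopeStep "false" = "false" := by
  induction l with
  | nil => rfl
  | cons x xs ih => simpa [isScopeStep] using ih

-- ===== VERDICT (by name: the statement is the Claim_ definition above) =====
theorem isScope_spec : Claim_equal_isScope := by
  intro stack _
  unfold Spec_isScope
  match stack with
  | [] => rfl
  | [x] =>
    simp only [isScope, isScope_alt, List.foldl, isScopeStep]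
    by_cases h : (x == "{" || x == "}") = true <;> simp [h]
  | x :: y :: rest =>
    simp only [isScope, isScope_alt, List.foldl]
    have h2 : isScopeStep (isScopeStep "T0" x) y = "false" := by
      unfold isScopeStep
      split <;> simp
    simp [h2, foldl_step_false]
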